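-- pv_equiv track=rewrite | github.com/splatpope/KNIFER | src/knifer/config/utils.py | doubling_arch_builder
-- ===== SOURCE A (Python) =====
-- def disc_features(
--         n_layers: int,
--         base_features: int,
--         features_list: "list[int]" = None
--     ) -> "list[int]":
--     """Derive list of features for generator tail layers.
--
--     Args:
--         n_layers (int): Amount of tail layers.
--         base_features (int): Base amount of features.
--             (i.e. in_c of the first mid layer)
--         feature_list (list[int], optional): List of in_c for the tail layers.
--             If missing, every layer will have double the preceding layer's features.
--             Defaults to None.
--     """
--
--     if not features_list:
--         features_list = [base_features]
--     assert features_list[0] == base_features, "Bogus features list."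
--     adds = [features_list[-1] * 2**(i+1) for i in range(n_layers - len(features_list))]
--     return features_list + adds
--
-- def doubling_arch_builder(img_size: int, base_features: int):
--     """Builds required parameters for an architectures that does x2 upscales/downscales
--     and doubles their layer feature, based on an image size and base number of features.
--
--     Args:
--         img_size (int): Image size for the models. (i.e. dataset and generator output)
--         base_features (int): Base amount of conv layer features.
--
--     Returns:
--         Parameters (Tuple[int, int, int]): Upscale/Downscale factor list and features.
--     """
--     scalings = []
--     size = 4
--     while size < img_size:
--         scalings.append(2)
--         size *= 2
--     features_d = disc_features(len(scalings), base_features)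
--     features_g = features_d[::-1]
--     return scalings, features_d, features_g
-- ===== SOURCE B (Python) =====
-- def doubling_arch_builder(img_size, base_features):
--     n = (img_size - 1).bit_length() - 2 if img_size > 4 else 0
--     scalings = [2] * n
--     features_d = [base_features * 2 ** i for i in range(n)] or [base_features]
--     features_g = features_d[::-1]
--     return scalings, features_d, features_g
-- ===== Notes on version B (the rewrite author's own statement) =====
-- stated objective: alternative
-- what changed: The while-loop that repeatedly doubles a size counter is replaced by a closed-form bit_length computation of the number of doublings, and disc_features' list-concatenation construction by a single comprehension.
import Mathlib
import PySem

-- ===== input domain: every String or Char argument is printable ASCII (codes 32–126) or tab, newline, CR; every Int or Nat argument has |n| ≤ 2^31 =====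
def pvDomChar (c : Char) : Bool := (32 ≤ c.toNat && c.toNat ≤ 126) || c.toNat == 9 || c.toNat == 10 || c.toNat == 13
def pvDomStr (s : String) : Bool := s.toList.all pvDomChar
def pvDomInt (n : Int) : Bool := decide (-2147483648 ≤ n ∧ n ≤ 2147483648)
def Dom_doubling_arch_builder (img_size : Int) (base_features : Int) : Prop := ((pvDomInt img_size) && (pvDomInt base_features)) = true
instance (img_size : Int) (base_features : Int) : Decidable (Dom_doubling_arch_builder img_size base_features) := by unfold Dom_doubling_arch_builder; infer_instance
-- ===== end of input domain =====

-- B replaces A's doubling while-loop by a closed-form bit_length count of the doublings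
-- and builds the feature list with a single comprehension (same cost; 'alternative'/'simpler' shape).

-- ===== PORT A =====
-- the 'while size < img_size: scalings.append(2); size *= 2' loop; fuel only makes the
-- recursion total (img_size.toNat + 1 steps always suffice since size doubles from 4)
def dabLoop : Nat → Int → Int → List Int
  | 0, _, _ => []
  | fuel + 1, img, size => if size < img then 2 :: dabLoop fuel img (size * 2) else []

-- literal port of disc_features as A calls it (features_list = None → [base_features];
-- the assert features_list[0] == base_features trivially holds there)
def disc_features (n_layers : Int) (base_features : Int) : List Int :=
  let features_list : List Int := [base_features]
  let adds := (PySem.List.pyRange 0 (n_layers - (features_list.length : Int)) 1).map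
      (fun i => base_features * 2 ^ (i + 1).toNat)
  features_list ++ adds

def doubling_arch_builder (img_size : Int) (base_features : Int) : List Int × List Int × List Int :=
  let scalings := dabLoop (img_size.toNat + 1) img_size 4
  let features_d := disc_features (scalings.length : Int) base_features
  let features_g := features_d.reverse   -- features_d[::-1]
  (scalings, features_d, features_g)

-- ===== PORT B =====
def doubling_arch_builder_alt (img_size : Int) (base_features : Int) : List Int × List Int × List Int :=
  -- n = (img_size - 1).bit_length() - 2 if img_size > 4 else 0 ; for x > 0, x.bit_length() = Nat.log2 x + 1
  let n : Nat := if 4 < img_size then (img_size - 1).toNat.log2 - 1 else 0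
  let scalings : List Int := List.replicate n 2
  let l := (List.range n).map (fun i => base_features * 2 ^ i)
  let features_d := if l.isEmpty then [base_features] else l
  let features_g := features_d.reverse
  (scalings, features_d, features_g)

-- ===== PRECONDITION & SPEC =====
def Spec_doubling_arch_builder (img_size : Int) (base_features : Int) (out : List Int × List Int × List Int) : Prop := out = doubling_arch_builder_alt img_size base_features
instance (img_size : Int) (base_features : Int) (out : List Int × List Int × List Int) : Decidable (Spec_doubling_arch_builder img_size base_features out) := by unfold Spec_doubling_arch_builder; infer_instance

-- ===== CLAIM (what is proved, stated in full; the proofs are below) =====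
def Claim_equal_doubling_arch_builder : Prop := ∀ (img_size : Int) (base_features : Int), Dom_doubling_arch_builder img_size base_features → Spec_doubling_arch_builder img_size base_features (doubling_arch_builder img_size base_features)

-- ===== LEMMAS AND PROOFS =====

-- the loop, run with enough fuel from a positive size, returns replicate k 2 for the unique
-- k with img ≤ size * 2^k and size * 2^j < img for all j < k
theorem dabLoop_spec (fuel : Nat) : ∀ (img size : Int), 0 < size → img ≤ size * 2 ^ fuel →
    ∃ k : Nat, dabLoop fuel img size = List.replicate k 2 ∧
      img ≤ size * 2 ^ k ∧ ∀ j < k, size * 2 ^ j < img := by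
  induction fuel with
  | zero =>
    intro img size hs h
    exact ⟨0, rfl, by simpa using h, by omega⟩
  | succ m ih =>
    intro img size hs h
    by_cases hlt : size < img
    · obtain ⟨k, hk, hle, hstep⟩ := ih img (size * 2) (by omega)
        (by rw [mul_assoc]; calc img ≤ size * 2 ^ (m + 1) := h
                                _ = size * (2 * 2 ^ m) := by ring)
      refine ⟨k + 1, ?_, ?_, ?_⟩
      · simp [dabLoop, hlt, hk, List.replicate_succ]
      · calc img ≤ size * 2 * 2 ^ k := hle
          _ = size * 2 ^ (k + 1) := by ring
      · intro j hj
        cases j with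
        | zero => simpa using hlt
        | succ j' =>
          have := hstep j' (by omega)
          calc size * 2 ^ (j' + 1) = size * 2 * 2 ^ j' := by ring
            _ < img := this
    · exact ⟨0, by simp [dabLoop, hlt], by simpa using not_lt.mp hlt, by omega⟩

theorem dab_count_unique (img size : Int) (k k' : Nat)
    (h1 : img ≤ size * 2 ^ k) (h2 : ∀ j < k, size * 2 ^ j < img)
    (h1' : img ≤ size * 2 ^ k') (h2' : ∀ j < k', size * 2 ^ j < img) : k = k' := by
  by_contra hne
  rcases Nat.lt_or_ge k k' with h | h
  · exact absurd h1 (not_le.mpr (h2' k h))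
  · exact absurd h1' (not_le.mpr (h2 k' (by omega)))

-- B's closed form satisfies the same characterization
theorem alt_count_spec (img : Int) :
    let n : Nat := if 4 < img then (img - 1).toNat.log2 - 1 else 0
    img ≤ 4 * 2 ^ n ∧ ∀ j < n, (4 : Int) * 2 ^ j < img := by
  intro n
  by_cases h : 4 < img
  · have hn : n = (img - 1).toNat.log2 - 1 := if_pos h
    set x := (img - 1).toNat with hx
    have hx4 : 4 ≤ x := by omega
    have hxe : (x : Int) = img - 1 := by omega
    have hne : x ≠ 0 := by omega
    have hm2 : 2 ≤ x.log2 := (Nat.le_log2 hne).mpr (by norm_num; omega)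
    have hup : x < 2 ^ (x.log2 + 1) := Nat.lt_log2_self
    have hlo : 2 ^ x.log2 ≤ x := Nat.log2_self_le hne
    constructor
    · have : x < 2 ^ (n + 2) := by
        have : n + 2 = x.log2 + 1 := by omega
        rw [this]; exact hup
      have : (x : Int) < 2 ^ (n + 2) := by exact_mod_cast this
      calc img = (x : Int) + 1 := by omega
        _ ≤ 2 ^ (n + 2) := by omega
        _ = 4 * 2 ^ n := by ring
    · intro j hj
      have hle : 2 ^ (j + 2) ≤ x := le_trans (Nat.pow_le_pow_right (by norm_num) (by omega)) hlo
      have : ((2 : Nat) ^ (j + 2) : Int) ≤ (x : Int) := by exact_mod_cast hle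
      have h2 : (4 : Int) * 2 ^ j = ((2 : Nat) ^ (j + 2) : Int) := by push_cast; ring
      omega
  · have hn : n = 0 := if_neg h
    exact ⟨by rw [hn]; simpa using not_lt.mp h, by rw [hn]; omega⟩

-- fuel img.toNat + 1 is always enough starting from size 4
theorem fuel_enough (img : Int) : img ≤ 4 * 2 ^ (img.toNat + 1) := by
  by_cases h : img ≤ 0
  · have : (0 : Int) < 4 * 2 ^ (img.toNat + 1) := by positivity
    omega
  · have h1 : img.toNat < 2 ^ img.toNat := Nat.lt_two_pow_self
    have h2 : (img.toNat : Int) < ((2 : Nat) ^ img.toNat : Int) := by exact_mod_cast h1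
    have h3 : ((2 : Nat) ^ img.toNat : Int) = 2 ^ img.toNat := by push_cast; ring
    have h4 : (2 : Int) ^ img.toNat ≤ 2 ^ (img.toNat + 1) := by
      apply pow_le_pow_right₀ <;> omega
    have h5 : (2 : Int) ^ (img.toNat + 1) ≤ 4 * 2 ^ (img.toNat + 1) := by
      have : (0 : Int) < 2 ^ (img.toNat + 1) := by positivity
      omega
    omega

-- A's feature construction at n layers equals B's comprehension-with-default
theorem feat_eq (n : Nat) (base : Int) :
    disc_features (n : Int) base =
      (let l := (List.range n).map (fun i => base * 2 ^ i);
       if l.isEmpty then [base] else l) := by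
  cases n with
  | zero => simp [disc_features]
  | succ m =>
    simp only [disc_features, PySem.List.pyRange_one, List.length_cons, List.length_nil]
    push_cast
    have h1 : ((m : Int) + 1 - 1 - 0).toNat = m := by omega
    rw [h1]
    simp [List.range_succ_eq_map, Function.comp_def, pow_succ]

-- ===== VERDICT (by name: the statement is the Claim_ definition above) =====
theorem doubling_arch_builder_spec : Claim_equal_doubling_arch_builder := by
  intro img base _
  unfold Spec_doubling_arch_builder doubling_arch_builder doubling_arch_builder_alt
  obtain ⟨k, hk, hle, hstep⟩ := dabLoop_spec (img.toNat + 1) img 4 (by norm_num) (fuel_enough img)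
  obtain ⟨hle', hstep'⟩ := alt_count_spec img
  have hkn : k = (if 4 < img then (img - 1).toNat.log2 - 1 else 0) :=
    dab_count_unique img 4 k _ hle hstep hle' hstep'
  simp only [hk, hkn, List.length_replicate]
  rw [feat_eq]
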